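-- pv_equiv track=rewrite | github.com/FranciscoCamoesM/NonCode-DL | dataset_analysis.py | count_dinucleotides
-- ===== SOURCE A (Python) =====
-- def count_dinucleotides(seq):
--     counts = {"AA": 0, "AC": 0, "AG": 0, "AT": 0,
--               "CA": 0, "CC": 0, "CG": 0, "CT": 0,
--               "GA": 0, "GC": 0, "GG": 0, "GT": 0,
--               "TA": 0, "TC": 0, "TG": 0, "TT": 0}
--     for i in range(len(seq)-1):
--         dinucleotide = seq[i:i+2]
--         if dinucleotide in counts:
--             counts[dinucleotide] += 1
--     return counts
-- ===== SOURCE B (Python) =====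
-- def count_dinucleotides(seq):
--     # No counting dict at all: list the adjacent pairs once, then for each of the
--     # 16 (a, b) letter combinations count its occurrences among the pairs.
--     pairs = list(zip(seq, seq[1:]))
--     return {a + b: pairs.count((a, b)) for a in "ACGT" for b in "ACGT"}
-- ===== Notes on version B (the rewrite author's own statement) =====
-- stated objective: alternative
-- what changed: B keeps no counting dict at all: it materialises the list of adjacent character pairs once and builds the result by counting, for each of the 16 nucleotide-letter combinations, the occurrences of that pair in the list (16 list.count passes instead of A's single guarded dict-increment loop).
import Mathlib
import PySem

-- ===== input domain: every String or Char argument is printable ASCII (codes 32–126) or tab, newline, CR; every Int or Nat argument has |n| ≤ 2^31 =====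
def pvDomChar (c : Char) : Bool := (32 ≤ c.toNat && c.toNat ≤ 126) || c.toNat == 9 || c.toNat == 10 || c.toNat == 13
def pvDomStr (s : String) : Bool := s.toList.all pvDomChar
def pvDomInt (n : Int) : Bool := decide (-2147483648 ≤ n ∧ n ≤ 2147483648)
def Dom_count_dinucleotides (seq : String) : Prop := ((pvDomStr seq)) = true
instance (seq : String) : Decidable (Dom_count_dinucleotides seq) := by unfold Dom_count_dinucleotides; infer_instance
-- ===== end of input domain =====

-- B keeps no counting dict at all: it lists the adjacent character pairs once and, for each of
-- the 16 letter combinations from 'ACGT' x 'ACGT', counts that pair's occurrences in the list.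

-- ===== PORT A =====
-- A's initial dict literal: all 16 dinucleotides mapped to 0
def pvInitCounts : PySem.Dict String Int := PySem.Dict.ofList
  [("AA", 0), ("AC", 0), ("AG", 0), ("AT", 0),
   ("CA", 0), ("CC", 0), ("CG", 0), ("CT", 0),
   ("GA", 0), ("GC", 0), ("GG", 0), ("GT", 0),
   ("TA", 0), ("TC", 0), ("TG", 0), ("TT", 0)]

def count_dinucleotides (seq : String) : List (String × Int) :=
  ((PySem.List.pyRange 0 (PySem.Str.len seq - 1) 1).foldl
    (fun counts i =>
      let dinucleotide := PySem.Str.slice seq (some i) (some (i + 2))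
      if counts.contains dinucleotide then counts.modify dinucleotide 0 (· + 1) else counts)
    pvInitCounts).items

-- ===== PORT B =====
def count_dinucleotides_alt (seq : String) : List (String × Int) :=
  let pairs := seq.toList.zip (PySem.List.slice seq.toList (some 1) none)
  "ACGT".toList.flatMap (fun a =>
    "ACGT".toList.map (fun b =>
      (String.ofList [a, b], (PySem.List.count pairs (a, b) : Int))))

-- ===== PRECONDITION & SPEC =====
def Spec_count_dinucleotides (seq : String) (out : List (String × Int)) : Prop := out = count_dinucleotides_alt seq
instance (seq : String) (out : List (String × Int)) : Decidable (Spec_count_dinucleotides seq out) := by unfold Spec_count_dinucleotides; infer_instance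

-- ===== CLAIM (what is proved, stated in full; the proofs are below) =====
def Claim_equal_count_dinucleotides : Prop := ∀ (seq : String), Dom_count_dinucleotides seq → Spec_count_dinucleotides seq (count_dinucleotides seq)

-- ===== LEMMAS AND PROOFS =====

-- A's index loop reads off exactly the adjacent 2-character strings
theorem pairsA_eq (seq : String) :
    (PySem.List.pyRange 0 ((seq.toList.length : Int) - 1) 1).map
        (fun i => PySem.Str.slice seq (some i) (some (i + 2)))
      = (seq.toList.zip seq.toList.tail).map (fun p => String.ofList [p.1, p.2]) := by
  rw [PySem.List.pyRange_one, List.map_map]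
  apply List.ext_getElem
  · simp [List.length_zip]
  · intro k h1 h2
    simp only [List.getElem_map, Function.comp, List.getElem_range, List.getElem_zip]
    have hk : k + 1 < seq.toList.length := by
      have hl : seq.toList.length = seq.length := String.length_toList
      simp [List.length_zip] at h2; omega
    apply String.toList_inj.mp
    rw [show ((0 : Int) + k) = (k : Int) by omega,
        show ((k : Int) + 2) = ((k : Int) + ((2 : Nat) : Int)) by omega]
    simp only [PySem.Str.toList_slice, PySem.Chars.slice_eq_listSlice,
      String.toList_ofList, PySem.List.slice_natCast_add]
    rw [List.drop_eq_getElem_cons (show k < seq.toList.length by omega),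
        List.drop_eq_getElem_cons hk,
        List.take_succ_cons, List.take_succ_cons, List.take_zero]
    simp [List.getElem_tail]

-- A's guarded loop never changes the key list
theorem keysA (P : List String) (d : PySem.Dict String Int) :
    (P.foldl (fun c x => if c.contains x then c.modify x 0 (· + 1) else c) d).keys = d.keys := by
  induction P generalizing d with
  | nil => rfl
  | cons x P ih =>
    simp only [List.foldl_cons]
    split
    · rename_i hx
      rw [ih, PySem.Dict.keys_modify, PySem.Dict.keys_insert_of_contains (h := hx)]
    · exact ih d

-- A's guarded loop: the value of a key already present counts its occurrences
theorem getDA (P : List String) (d : PySem.Dict String Int) (k : String)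
    (hk : d.contains k = true) :
    (P.foldl (fun c x => if c.contains x then c.modify x 0 (· + 1) else c) d).getD k 0
      = d.getD k 0 + P.count k := by
  induction P generalizing d with
  | nil => simp
  | cons x P ih =>
    simp only [List.foldl_cons]
    by_cases hx : d.contains x = true
    · rw [if_pos hx, ih _ (by simp [PySem.Dict.contains_modify, hk]),
          PySem.Dict.getD_modify, List.count_cons]
      by_cases hkx : k = x
      · subst hkx; simp; omega
      · simp [hkx, Ne.symm hkx]
    · rw [if_neg hx, ih _ hk, List.count_cons]
      have hxk : ¬ x = k := fun h => hx (h ▸ hk)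
      simp [hxk]

-- joining a pair of characters into a 2-character string is injective
theorem pairStr_injective : Function.Injective (fun p : Char × Char => String.ofList [p.1, p.2]) := by
  intro ⟨a, b⟩ ⟨c, d⟩ h
  have := congrArg String.toList h
  simp [String.toList_ofList] at this
  simp [this.1, this.2]

-- counting a 2-character string among the joined pairs = counting the pair itself
theorem count_pairStr (l : List (Char × Char)) (a b : Char) :
    (l.map (fun p => String.ofList [p.1, p.2])).count (String.ofList [a, b]) = l.count (a, b) :=
  List.count_map_of_injective l _ pairStr_injective (a, b)

-- ===== VERDICT (by name: the statement is the Claim_ definition above) =====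
theorem count_dinucleotides_spec : Claim_equal_count_dinucleotides := by
  intro seq _
  unfold Spec_count_dinucleotides count_dinucleotides count_dinucleotides_alt
  rw [PySem.List.slice_from_one]
  set pairs := seq.toList.zip seq.toList.tail with hpairs
  set P := pairs.map (fun p => String.ofList [p.1, p.2]) with hP
  -- A's fold over indices is the guarded fold over the pair strings
  have hfold :
      (PySem.List.pyRange 0 (PySem.Str.len seq - 1) 1).foldl
        (fun counts i =>
          let dinucleotide := PySem.Str.slice seq (some i) (some (i + 2))
          if counts.contains dinucleotide then counts.modify dinucleotide 0 (· + 1) else counts)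
        pvInitCounts
      = P.foldl (fun c x => if c.contains x then c.modify x 0 (· + 1) else c) pvInitCounts := by
    rw [hP, hpairs, ← pairsA_eq, List.foldl_map, PySem.Str.len_eq]
  rw [hfold]
  have hkeys : (P.foldl (fun c x => if c.contains x then c.modify x 0 (· + 1) else c)
      pvInitCounts).keys = pvInitCounts.keys := keysA P pvInitCounts
  rw [PySem.Dict.items_eq_map_keys _ (by rw [hkeys]; decide) 0, hkeys]
  -- the fold's value at each of the 16 (already present, zero-initialised) keys
  have hval : ∀ a b : Char, pvInitCounts.contains (String.ofList [a, b]) = true →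
      pvInitCounts.getD (String.ofList [a, b]) 0 = 0 →
      (P.foldl (fun c x => if c.contains x then c.modify x 0 (· + 1) else c)
          pvInitCounts).getD (String.ofList [a, b]) 0 = (pairs.count (a, b) : Int) := by
    intro a b h1 h2
    rw [getDA _ _ _ h1, h2, hP, count_pairStr, zero_add]
  -- both sides are explicit 16-entry lists; compare them entrywise
  have hACGT : "ACGT".toList = ['A', 'C', 'G', 'T'] := rfl
  have hK : pvInitCounts.keys
      = ["AA", "AC", "AG", "AT", "CA", "CC", "CG", "CT",
         "GA", "GC", "GG", "GT", "TA", "TC", "TG", "TT"] := by decide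
  simp only [hK, hACGT, List.map_cons, List.map_nil, List.flatMap_cons, List.flatMap_nil,
    List.cons_append, List.nil_append, List.append_nil, PySem.List.count_eq,
    List.cons.injEq, Prod.mk.injEq, and_true]
  exact ⟨⟨by decide, hval 'A' 'A' (by decide) (by decide)⟩, ⟨by decide, hval 'A' 'C' (by decide) (by decide)⟩, ⟨by decide, hval 'A' 'G' (by decide) (by decide)⟩, ⟨by decide, hval 'A' 'T' (by decide) (by decide)⟩, ⟨by decide, hval 'C' 'A' (by decide) (by decide)⟩, ⟨by decide, hval 'C' 'C' (by decide) (by decide)⟩, ⟨by decide, hval 'C' 'G' (by decide) (by decide)⟩, ⟨by decide, hval 'C' 'T' (by decide) (by decide)⟩, ⟨by decide, hval 'G' 'A' (by decide) (by decide)⟩, ⟨by decide, hval 'G' 'C' (by decide) (by decide)⟩, ⟨by decide, hval 'G' 'G' (by decide) (by decide)⟩, ⟨by decide, hval 'G' 'T' (by decide) (by decide)⟩, ⟨by decide, hval 'T' 'A' (by decide) (by decide)⟩, ⟨by decide, hval 'T' 'C' (by decide) (by decide)⟩, ⟨by decide, hval 'T' 'G' (by decide) (by decide)⟩, ⟨by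 decide, hval 'T' 'T' (by decide) (by decide)⟩⟩
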